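-- pv_equiv track=rewrite | github.com/Fondamenti18/fondamenti-di-programmazione | students/1812793/homework05/program01.py | trova_quartine
-- ===== SOURCE A (Python) =====
-- def trova_quartine(c):
--     a=[]
--     b=[]
--     first=True
--     for i in range(1,len(c)):
--         if first==True and (c[i][1]==(1,0) or c[i][1]==(0,1)):
--             first=False
--             a+=[c[i][0][-1]]
--         elif c[i][1]==(1,1):
--             a+=[c[i][0][-1]]
--         elif c[i][1]==(0,2) or c[i][1]==(2,0):
--             b+=[c[i][0][-1]]
--     if len(a)<=len(b):
--         return (a,b)
--     else:
--         return (b,a)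
-- ===== SOURCE B (Python) =====
-- def trova_quartine(c):
--     special_idx = next((i for i in range(1, len(c))
--                         if c[i][1] == (1, 0) or c[i][1] == (0, 1)), None)
--     a = [c[i][0][-1] for i in range(1, len(c))
--          if c[i][1] == (1, 1) or i == special_idx]
--     b = [c[i][0][-1] for i in range(1, len(c))
--          if c[i][1] == (0, 2) or c[i][1] == (2, 0)]
--     return (a, b) if len(a) <= len(b) else (b, a)
-- ===== Notes on version B (the rewrite author's own statement) =====
-- stated objective: alternative
-- what changed: A's single flag-driven scan threading (a, b, first) is replaced by precomputing the index of the first special (1,0)/(0,1) entry and then building the two lists with two independent filtered passes.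
import Mathlib
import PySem

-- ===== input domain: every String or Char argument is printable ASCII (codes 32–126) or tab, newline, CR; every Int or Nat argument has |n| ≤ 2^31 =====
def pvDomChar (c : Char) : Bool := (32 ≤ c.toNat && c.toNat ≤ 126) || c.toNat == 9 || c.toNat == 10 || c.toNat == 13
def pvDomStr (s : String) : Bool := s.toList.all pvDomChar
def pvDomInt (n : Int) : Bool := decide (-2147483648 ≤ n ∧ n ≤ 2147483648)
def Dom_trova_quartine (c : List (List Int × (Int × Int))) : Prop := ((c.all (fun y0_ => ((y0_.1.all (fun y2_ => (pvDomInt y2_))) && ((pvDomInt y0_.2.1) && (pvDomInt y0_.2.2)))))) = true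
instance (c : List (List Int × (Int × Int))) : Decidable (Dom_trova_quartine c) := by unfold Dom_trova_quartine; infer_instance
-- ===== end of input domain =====

-- B replaces A's flag-driven single scan with a precomputed first-special-index plus two
-- independent filtered passes (objective: alternative decomposition, same cost).

-- ===== PORT A =====
-- A's loop `for i in range(1,len(c))` visits exactly the elements of c.drop 1 in order;
-- the loop body threads (a, b, first).  `c[i][0][-1]` is PySem.List.pyGet? _ (-1):
-- none (= IndexError) aborts the whole computation.
def pvGoA : List (List Int × (Int × Int)) → List Int → List Int → Bool →
    Option (List Int × List Int)
  | [], a, b, _ => some (if a.length ≤ b.length then (a, b) else (b, a))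
  | (xs, t) :: r, a, b, first =>
    if first && (t == ((1 : Int), (0 : Int)) || t == ((0 : Int), (1 : Int))) then
      (PySem.List.pyGet? xs (-1)).bind fun v => pvGoA r (a ++ [v]) b false
    else if t == ((1 : Int), (1 : Int)) then
      (PySem.List.pyGet? xs (-1)).bind fun v => pvGoA r (a ++ [v]) b first
    else if t == ((0 : Int), (2 : Int)) || t == ((2 : Int), (0 : Int)) then
      (PySem.List.pyGet? xs (-1)).bind fun v => pvGoA r a (b ++ [v]) first
    else pvGoA r a b first

def trova_quartine (c : List (List Int × (Int × Int))) : List Int × List Int :=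
  (pvGoA (c.drop 1) [] [] true).getD ([], [])

-- ===== PORT B =====
-- the generator's predicate: tag is (1,0) or (0,1)
def pvIsSpec (p : List Int × (Int × Int)) : Bool :=
  p.2 == ((1 : Int), (0 : Int)) || p.2 == ((0 : Int), (1 : Int))

-- the `a`-comprehension: keep entries whose tag is (1,1) or whose index equals special_idx
def pvCollA : List (List Int × (Int × Int)) → Nat → Option Nat → Option (List Int)
  | [], _, _ => some []
  | (xs, t) :: r, i, s? =>
    if t == ((1 : Int), (1 : Int)) || s? == some i then
      (PySem.List.pyGet? xs (-1)).bind fun v => (pvCollA r (i + 1) s?).map (v :: ·)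
    else pvCollA r (i + 1) s?

-- the `b`-comprehension: keep entries whose tag is (0,2) or (2,0)
def pvCollB : List (List Int × (Int × Int)) → Option (List Int)
  | [] => some []
  | (xs, t) :: r =>
    if t == ((0 : Int), (2 : Int)) || t == ((2 : Int), (0 : Int)) then
      (PySem.List.pyGet? xs (-1)).bind fun v => (pvCollB r).map (v :: ·)
    else pvCollB r

def trova_quartine_alt (c : List (List Int × (Int × Int))) : List Int × List Int :=
  let t := c.drop 1
  -- special_idx = next((i for i in range(1,len(c)) if …), None), as an index into t
  match pvCollA t 0 (t.findIdx? pvIsSpec), pvCollB t with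
  | some a, some b => if a.length ≤ b.length then (a, b) else (b, a)
  | _, _ => ([], [])

-- ===== PRECONDITION & SPEC =====
-- Pre_ excludes exactly the inputs where Python A raises IndexError: an element of c.drop 1
-- whose tag makes A append (tag (1,1), (0,2), (2,0), or the FIRST (1,0)/(0,1) tag) but whose
-- list component is empty, so c[i][0][-1] fails.
def Pre_trova_quartine (c : List (List Int × (Int × Int))) : Prop :=
  ∀ i, (h : i < (c.drop 1).length) →
    ((((c.drop 1)[i].2 = ((1 : Int), (1 : Int)) ∨ (c.drop 1)[i].2 = ((0 : Int), (2 : Int)) ∨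
       (c.drop 1)[i].2 = ((2 : Int), (0 : Int))) ∨
      (((c.drop 1)[i].2 = ((1 : Int), (0 : Int)) ∨ (c.drop 1)[i].2 = ((0 : Int), (1 : Int))) ∧
       ∀ j, (hj : j < i) → ¬ ((c.drop 1)[j]'(hj.trans h)).2 = ((1 : Int), (0 : Int)) ∧
         ¬ ((c.drop 1)[j]'(hj.trans h)).2 = ((0 : Int), (1 : Int)))) →
     (c.drop 1)[i].1 ≠ [])

instance (c : List (List Int × (Int × Int))) : Decidable (Pre_trova_quartine c) := by
  unfold Pre_trova_quartine; infer_instance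

def pvWitness_trova_quartine : (List (List Int × (Int × Int))) :=
  [([], (0, 0)), ([1, 2], (1, 0)), ([3], (1, 1)), ([4], (0, 2))]

def Spec_trova_quartine (c : List (List Int × (Int × Int))) (out : List Int × List Int) : Prop := out = trova_quartine_alt c
instance (c : List (List Int × (Int × Int))) (out : List Int × List Int) : Decidable (Spec_trova_quartine c out) := by unfold Spec_trova_quartine; infer_instance

-- ===== CLAIM (what is proved, stated in full; the proofs are below) =====
def Claim_equal_trova_quartine : Prop := ∀ (c : List (List Int × (Int × Int))), Dom_trova_quartine c → Pre_trova_quartine c → Spec_trova_quartine c (trova_quartine c)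

-- ===== LEMMAS AND PROOFS =====

-- combine accumulators with the two collected streams; none = IndexError on either side
def pvPack (a b : List Int) : Option (List Int) → Option (List Int) → Option (List Int × List Int)
  | some x, some y =>
      some (if (a ++ x).length ≤ (b ++ y).length then (a ++ x, b ++ y) else (b ++ y, a ++ x))
  | _, _ => none

theorem pvPack_shiftA (a b : List Int) (v : Int) (x y : Option (List Int)) :
    pvPack (a ++ [v]) b x y = pvPack a b (x.map (v :: ·)) y := by
  cases x <;> cases y <;> simp [pvPack, List.append_assoc]

theorem pvPack_shiftB (a b : List Int) (v : Int) (x y : Option (List Int)) :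
    pvPack a (b ++ [v]) x y = pvPack a b x (y.map (v :: ·)) := by
  cases x <;> cases y <;> simp [pvPack, List.append_assoc]

-- a stale special index (already passed) behaves like none
theorem pvCollA_stale (t : List (List Int × (Int × Int))) :
    ∀ i k, k < i → pvCollA t i (some k) = pvCollA t i none := by
  induction t with
  | nil => intro i k _; rfl
  | cons hd r ih =>
    intro i k hki
    obtain ⟨xs, tg⟩ := hd
    have hk : (some k == some i) = false := by
      simp [beq_eq_false_iff_ne]; omega
    simp only [pvCollA]
    rw [ih (i + 1) k (by omega)]
    simp [hk]

-- A's loop with first = False equals B's two passes with no special index pending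
theorem pvGoA_false (t : List (List Int × (Int × Int))) :
    ∀ i a b, pvGoA t a b false = pvPack a b (pvCollA t i none) (pvCollB t) := by
  induction t with
  | nil => intro i a b; simp [pvGoA, pvCollA, pvCollB, pvPack]
  | cons hd r ih =>
    intro i a b
    obtain ⟨xs, tg⟩ := hd
    by_cases h1 : tg = ((1 : Int), (1 : Int))
    · simp only [pvGoA, pvCollA, pvCollB, h1]
      norm_num
      cases hg : PySem.List.pyGet? xs (-1) with
      | none => simp [pvPack]
      | some v => simp [ih (i + 1) (a ++ [v]) b, pvPack_shiftA]
    · by_cases h2 : tg = ((0 : Int), (2 : Int)) ∨ tg = ((2 : Int), (0 : Int))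
      · simp only [pvGoA, pvCollA, pvCollB]
        rcases h2 with h | h <;>
        · subst h
          norm_num
          cases hg : PySem.List.pyGet? xs (-1) with
          | none => simp [pvPack]
          | some v => simp [ih (i + 1) a (b ++ [v]), pvPack_shiftB]
      · push_neg at h2
        simp only [pvGoA, pvCollA, pvCollB]
        simp [h1, h2.1, h2.2, ih (i + 1) a b]

-- A's loop with first = True equals B's passes with the pending first-special index
theorem pvGoA_true (t : List (List Int × (Int × Int))) :
    ∀ i a b, pvGoA t a b true =
      pvPack a b (pvCollA t i ((t.findIdx? pvIsSpec).map (· + i))) (pvCollB t) := by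
  induction t with
  | nil => intro i a b; simp [pvGoA, pvCollA, pvCollB, pvPack]
  | cons hd r ih =>
    intro i a b
    obtain ⟨xs, tg⟩ := hd
    by_cases hs : tg = ((1 : Int), (0 : Int)) ∨ tg = ((0 : Int), (1 : Int))
    · have hspec : pvIsSpec (xs, tg) = true := by
        rcases hs with h | h <;> simp [pvIsSpec, h]
      have hfi : (((xs, tg) :: r).findIdx? pvIsSpec).map (· + i) = some i := by
        rw [List.findIdx?_cons, hspec]; simp
      rw [hfi]
      simp only [pvGoA, pvCollA, pvCollB]
      rcases hs with h | h <;>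
      · subst h
        norm_num
        cases hg : PySem.List.pyGet? xs (-1) with
        | none => simp [pvPack]
        | some v =>
          rw [show ∀ (f : Int → Option (List Int × List Int)), (some v).bind f = f v
                from fun _ => rfl,
            show ∀ (f : Int → Option (List Int)), (some v).bind f = f v from fun _ => rfl,
            pvCollA_stale r (i + 1) i (by omega), pvGoA_false r (i + 1) (a ++ [v]) b]
          simp [pvPack_shiftA]
    · push_neg at hs
      have hspec : pvIsSpec (xs, tg) = false := by simp [pvIsSpec, hs.1, hs.2]
      have hmap : (((xs, tg) :: r).findIdx? pvIsSpec).map (· + i)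
          = (r.findIdx? pvIsSpec).map (· + (i + 1)) := by
        rw [List.findIdx?_cons, hspec]
        cases r.findIdx? pvIsSpec <;> simp <;> omega
      have hne : ((r.findIdx? pvIsSpec).map (· + (i + 1)) == some i) = false := by
        cases r.findIdx? pvIsSpec with
        | none => rfl
        | some m => simp [beq_eq_false_iff_ne]; omega
      rw [hmap]
      by_cases h1 : tg = ((1 : Int), (1 : Int))
      · subst h1
        simp only [pvGoA, pvCollA, pvCollB]
        norm_num [hne]
        cases hg : PySem.List.pyGet? xs (-1) with
        | none => simp [pvPack]
        | some v => simp [ih (i + 1) (a ++ [v]) b, pvPack_shiftA]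
      · by_cases h2 : tg = ((0 : Int), (2 : Int)) ∨ tg = ((2 : Int), (0 : Int))
        · simp only [pvGoA, pvCollA, pvCollB]
          rcases h2 with h | h <;>
          · subst h
            norm_num [hne]
            cases hg : PySem.List.pyGet? xs (-1) with
            | none => simp [pvPack]
            | some v => simp [ih (i + 1) a (b ++ [v]), pvPack_shiftB]
        · push_neg at h2
          simp only [pvGoA, pvCollA, pvCollB]
          simp [h1, h2.1, h2.2, hs.1, hs.2, hne, ih (i + 1) a b]

-- ===== VERDICT (by name: the statement is the Claim_ definition above) =====
theorem trova_quartine_spec : Claim_equal_trova_quartine := by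
  intro c _ _
  unfold Spec_trova_quartine trova_quartine trova_quartine_alt
  simp only [List.drop_one]
  rw [pvGoA_true c.tail 0 [] []]
  have h0 : (c.tail.findIdx? pvIsSpec).map (· + 0) = c.tail.findIdx? pvIsSpec := by
    cases c.tail.findIdx? pvIsSpec <;> simp
  rw [h0]
  cases pvCollA c.tail 0 (c.tail.findIdx? pvIsSpec) <;>
    cases pvCollB c.tail <;> simp [pvPack]
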